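-- pv_equiv track=rewrite | github.com/kaist-ina/NAS_demo | super_resolution/utility.py | random_gradual_03
-- ===== SOURCE A (Python) =====
-- def random_gradual_03(elem_list):
--     random_list = []
--
--     for i in range(len(elem_list)):
--         if i == len(elem_list) - 1:
--             random_list.extend([elem_list[i]] * len(random_list))
--         else:
--             random_list.extend([elem_list[i]] *  1)
--
--     return random_list
-- ===== SOURCE B (Python) =====
-- def random_gradual_03(elem_list):
--     # Pointwise construction: the output has 2*(n-1) positions; position k
--     # holds elem_list[k] for k < n-1 and the last element otherwise.
--     n = len(elem_list)
--     return [elem_list[k] if k < n - 1 else elem_list[n - 1] for k in range(2 * (n - 1))]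
-- ===== Notes on version B (the rewrite author's own statement) =====
-- stated objective: alternative
-- what changed: Replaces A's accumulator loop (append each element, then at the last index extend by the last element repeated len(accumulator) times) with a direct pointwise construction of the output: its length 2*(n-1) is computed up front and each output position k is filled by an index formula (elem_list[k] if k < n-1 else the last element), with no accumulator or self-referential extend.
import Mathlib
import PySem

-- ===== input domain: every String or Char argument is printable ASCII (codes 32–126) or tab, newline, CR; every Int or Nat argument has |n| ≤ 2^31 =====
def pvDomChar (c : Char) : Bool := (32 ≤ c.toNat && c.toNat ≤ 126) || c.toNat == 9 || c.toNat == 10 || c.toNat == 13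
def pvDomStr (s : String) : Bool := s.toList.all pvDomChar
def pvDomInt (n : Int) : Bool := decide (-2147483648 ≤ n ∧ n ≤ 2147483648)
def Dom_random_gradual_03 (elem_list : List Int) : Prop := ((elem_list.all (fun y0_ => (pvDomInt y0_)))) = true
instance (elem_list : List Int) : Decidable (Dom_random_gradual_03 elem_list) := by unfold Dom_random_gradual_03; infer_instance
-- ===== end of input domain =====

-- B replaces A's accumulator loop with a pointwise construction: output position k
-- holds elem_list[k] for k < n-1 and the last element otherwise (objective: alternative).

-- ===== PORT A =====
def random_gradual_03 (elem_list : List Int) : List Int :=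
  (PySem.List.pyRange 0 (elem_list.length : Int) 1).foldl
    (fun random_list i =>
      if i = (elem_list.length : Int) - 1 then
        random_list ++ List.replicate random_list.length (PySem.List.pyGetD elem_list i 0)
      else
        random_list ++ [PySem.List.pyGetD elem_list i 0]) []

-- ===== PORT B =====
def random_gradual_03_alt (elem_list : List Int) : List Int :=
  (PySem.List.pyRange 0 (2 * ((elem_list.length : Int) - 1)) 1).map
    (fun k =>
      if k < (elem_list.length : Int) - 1 then PySem.List.pyGetD elem_list k 0
      else PySem.List.pyGetD elem_list ((elem_list.length : Int) - 1) 0)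

-- ===== PRECONDITION & SPEC =====
def Spec_random_gradual_03 (elem_list : List Int) (out : List Int) : Prop := out = random_gradual_03_alt elem_list
instance (elem_list : List Int) (out : List Int) : Decidable (Spec_random_gradual_03 elem_list out) := by unfold Spec_random_gradual_03; infer_instance

-- ===== CLAIM (what is proved, stated in full; the proofs are below) =====
def Claim_equal_random_gradual_03 : Prop := ∀ (elem_list : List Int), Dom_random_gradual_03 elem_list → Spec_random_gradual_03 elem_list (random_gradual_03 elem_list)

-- ===== LEMMAS AND PROOFS =====

-- common closed form: first n-1 elements once, then the last element n-1 times
def pvCF (l : List Int) : List Int :=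
  match h : l with
  | [] => []
  | _ :: _ => l.take (l.length - 1) ++ List.replicate (l.length - 1) (l.getLast (by simp [h]))

-- mapping pyGetD over range 0..k equals take k
theorem pv_map_get_range (l : List Int) (k : Nat) (hk : k ≤ l.length) :
    (PySem.List.pyRange 0 (k : Int) 1).map (fun j => PySem.List.pyGetD l j 0) = l.take k := by
  induction k with
  | zero => simp [PySem.List.pyRange]
  | succ m ih =>
    rw [show ((m + 1 : Nat) : Int) = (m : Int) + 1 by push_cast; ring,
        PySem.List.pyRange_one_succ_right (by positivity)]
    rw [List.map_append, ih (by omega)]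
    have hm : m < l.length := by omega
    simp only [List.map_cons, List.map_nil]
    rw [PySem.List.pyGetD_eq_getElem l 0 (i := (m : Int)) (Int.natCast_nonneg m) (by omega)]
    simp only [Int.toNat_natCast, List.take_add_one, List.getElem?_eq_getElem hm, Option.toList_some]

theorem pvA_eq_cf (l : List Int) : random_gradual_03 l = pvCF l := by
  cases l with
  | nil => simp [random_gradual_03, pvCF, PySem.List.pyRange]
  | cons a as =>
    have hne : (a :: as) ≠ [] := by simp
    set l := a :: as with hl
    have hlen : 1 ≤ l.length := by simp [hl]
    unfold random_gradual_03 pvCF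
    obtain ⟨m, hm⟩ : ∃ m : Nat, l.length = m + 1 := ⟨l.length - 1, by omega⟩
    rw [hm]
    rw [show ((m + 1 : Nat) : Int) = (m : Int) + 1 by push_cast; ring,
        PySem.List.pyRange_one_succ_right (by positivity)]
    rw [List.foldl_append]
    have hfirst :
        List.foldl
          (fun random_list i =>
            if i = (m : Int) + 1 - 1 then
              random_list ++ List.replicate random_list.length (PySem.List.pyGetD l i 0)
            else random_list ++ [PySem.List.pyGetD l i 0])
          [] (PySem.List.pyRange 0 (m : Int)) = l.take m := by
      rw [PySem.List.foldl_congr_mem _ _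
          (fun random_list i => random_list ++ [PySem.List.pyGetD l i 0]) _
          (by
            intro acc x hx
            have hx' := (PySem.List.mem_pyRange_one).1 hx
            have hne' : x ≠ (m : Int) + 1 - 1 := by omega
            rw [if_neg hne'])]
      rw [PySem.List.foldl_append_singleton_eq_map, List.nil_append]
      exact pv_map_get_range l m (by omega)
    rw [hfirst]
    simp only [List.foldl_cons, List.foldl_nil]
    rw [if_pos (by ring)]
    have hget : PySem.List.pyGetD l ((m : Int)) 0 = l[(m : Int).toNat]'(by omega) :=
      PySem.List.pyGetD_eq_getElem l 0 (Int.natCast_nonneg m) (by omega)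
    have hlast : l.getLast hne = l[(m : Int).toNat]'(by omega) := by
      rw [List.getLast_eq_getElem]
      congr 1
      omega
    rw [hget, ← hlast]
    have htl : (l.take m).length = m := by
      rw [List.length_take]; omega
    rw [htl]
    congr 2 <;> omega

theorem pvB_eq_cf (l : List Int) : random_gradual_03_alt l = pvCF l := by
  cases l with
  | nil => simp [random_gradual_03_alt, pvCF, PySem.List.pyRange_one_eq_nil]
  | cons a as =>
    have hne : (a :: as) ≠ [] := by simp
    set l := a :: as with hl
    obtain ⟨m, hm⟩ : ∃ m : Nat, l.length = m + 1 := ⟨l.length - 1, by simp [hl]⟩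
    unfold random_gradual_03_alt pvCF
    rw [hm]
    have hcast : ((m + 1 : Nat) : Int) - 1 = (m : Int) := by push_cast; ring
    rw [hcast]
    have hsplit : PySem.List.pyRange 0 (2 * (m : Int)) 1
        = PySem.List.pyRange 0 (m : Int) 1 ++ PySem.List.pyRange (m : Int) (2 * (m : Int)) 1 :=
      PySem.List.pyRange_one_append 0 (m : Int) (2 * (m : Int)) (by positivity) (by omega)
    rw [hsplit, List.map_append]
    have hlo : (PySem.List.pyRange 0 (m : Int) 1).map
        (fun k => if k < (m : Int) then PySem.List.pyGetD l k 0
                  else PySem.List.pyGetD l (m : Int) 0) = l.take m := by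
      rw [List.map_congr_left (g := fun k => PySem.List.pyGetD l k 0)
          (by intro x hx
              have hx' := (PySem.List.mem_pyRange_one).1 hx
              exact if_pos (by omega))]
      exact pv_map_get_range l m (by omega)
    have hhi : (PySem.List.pyRange (m : Int) (2 * (m : Int)) 1).map
        (fun k => if k < (m : Int) then PySem.List.pyGetD l k 0
                  else PySem.List.pyGetD l (m : Int) 0)
        = List.replicate m (PySem.List.pyGetD l (m : Int) 0) := by
      rw [List.map_congr_left (g := fun _ => PySem.List.pyGetD l (m : Int) 0)
          (by intro x hx
              have hx' := (PySem.List.mem_pyRange_one).1 hx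
              exact if_neg (by omega))]
      rw [List.map_const']
      congr 1
      rw [PySem.List.length_pyRange_one]
      omega
    rw [hlo, hhi]
    have hget : PySem.List.pyGetD l ((m : Int)) 0 = l[(m : Int).toNat]'(by omega) :=
      PySem.List.pyGetD_eq_getElem l 0 (Int.natCast_nonneg m) (by omega)
    have hlast : l.getLast hne = l[(m : Int).toNat]'(by omega) := by
      rw [List.getLast_eq_getElem]
      congr 1
      omega
    rw [hget, ← hlast]
    congr 2 <;> omega

-- ===== VERDICT (by name: the statement is the Claim_ definition above) =====
theorem random_gradual_03_spec : Claim_equal_random_gradual_03 := by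
  intro l _
  unfold Spec_random_gradual_03
  rw [pvA_eq_cf, pvB_eq_cf]
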